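-- pv_equiv track=rewrite | github.com/saneax/mythings | scripts/projects/python/excercise/strman.py | strman
-- ===== SOURCE A (Python) =====
-- def strman(str):
--     str_c=str.lower()
--     c = list(str_c)
--     ctr=0
--     alphabets=list(map(chr,range(97,123)))
--     for l in list(str_c):
--         if l == ' ':
--             ctr = ctr +1
--             continue
--
--         if alphabets.index(l) == 25:
--             i = 0;
--         else:
--             i=alphabets.index(l) + 1
--
--         c[ctr] = alphabets[i]
--         ctr = ctr +1
--
--     str_c = ''.join(c)
--     vowels = list("aeiou")
--     for i in range(len(str_c)):
--         if str_c[i] in vowels: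
--             c[i] = str_c[i].upper()
--
--     return ''.join(c)
-- ===== SOURCE B (Python) =====
-- def strman(str):
--     table = {}
--     for i in range(26):
--         sh = chr(97 + (i + 1) % 26)
--         table[chr(97 + i)] = sh.upper() if sh in "aeiou" else sh
--     out = []
--     for ch in str.lower():
--         if ch == ' ':
--             out.append(ch)
--         elif ch in table:
--             out.append(table[ch])
--         else:
--             raise ValueError("invalid character: %r" % ch)
--     return ''.join(out)
-- ===== Notes on version B (the rewrite author's own statement) =====
-- stated objective: faster
-- what changed: Replaces A's two passes (a shift pass doing a linear alphabets.index scan per char plus a separate vowel-uppercasing rescan of the whole string) with one precomputed 26-entry dict (shift and vowel-uppercasing folded in) and a single lookup pass over str.lower().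
import Mathlib
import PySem

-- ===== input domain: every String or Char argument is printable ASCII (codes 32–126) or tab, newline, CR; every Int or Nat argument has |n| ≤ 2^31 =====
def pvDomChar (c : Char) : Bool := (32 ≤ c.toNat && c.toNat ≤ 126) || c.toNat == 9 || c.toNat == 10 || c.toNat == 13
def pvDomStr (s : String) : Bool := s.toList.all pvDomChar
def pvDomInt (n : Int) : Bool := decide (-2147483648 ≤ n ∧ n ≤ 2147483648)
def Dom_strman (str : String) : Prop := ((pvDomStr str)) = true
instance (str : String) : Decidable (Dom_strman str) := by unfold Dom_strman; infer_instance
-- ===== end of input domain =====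

-- B replaces A's two passes (per-char alphabets.index shift, then a vowel-uppercasing rescan)
-- with one precomputed 26-entry table and a single pass over str.lower(); proved equal on Pre_.


-- ===== PORT A =====
-- alphabets = list(map(chr, range(97,123)))
def strmanAlphabets : List Char := (PySem.List.pyRange 97 123 1).map (fun n => Char.ofNat n.toNat)

-- vowels = list("aeiou")
def strmanVowels : List Char := "aeiou".toList

-- first loop: shift every letter by one (spaces skipped), ctr tracks the position;
-- alphabets.index(l) raises ValueError on non-letters — excluded by Pre_, here getD 0.
def strmanLoop1 : List Char → List Char → Nat → List Char
  | [], c, _ => c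
  | l :: rest, c, ctr =>
    if l = ' ' then strmanLoop1 rest c (ctr + 1)
    else
      let i := if (PySem.List.index? strmanAlphabets l).getD 0 = 25 then 0
               else (PySem.List.index? strmanAlphabets l).getD 0 + 1
      strmanLoop1 rest (c.set ctr (strmanAlphabets.getD i ' ')) (ctr + 1)

-- second loop: for i in range(len(str_c)): if str_c[i] in vowels: c[i] = str_c[i].upper()
def strmanLoop2 (s : List Char) (c : List Char) : List Char :=
  (List.range s.length).foldl
    (fun c i => if s.getD i ' ' ∈ strmanVowels
                then c.set i (PySem.Chars.upperChar (s.getD i ' ')) else c) c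

def strman (str : String) : String :=
  let str_c := PySem.Str.lower str
  let c := str_c.toList
  let c1 := strmanLoop1 str_c.toList c 0
  let str_c2 := String.ofList c1          -- str_c = ''.join(c)
  let c2 := strmanLoop2 str_c2.toList c1
  String.ofList c2

-- ===== PORT B =====
-- precomputed table: each lowercase letter -> shifted char, uppercased if the shifted char is a vowel
def strmanTable : PySem.Dict Char Char :=
  (List.range 26).foldl
    (fun d i =>
      let sh := Char.ofNat (97 + (i + 1) % 26)
      d.insert (Char.ofNat (97 + i))
        (if PySem.Chars.isIn [sh] "aeiou".toList then PySem.Chars.upperChar sh else sh))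
    PySem.Dict.empty

-- single pass over str.lower(); a char neither ' ' nor in the table raises ValueError in
-- Python (excluded by Pre_) — here that branch returns the char unchanged.
def strman_alt (str : String) : String :=
  String.ofList ((PySem.Str.lower str).toList.foldl
    (fun out ch => out ++ [if ch = ' ' then ch else
                             match strmanTable.get? ch with
                             | some v => v
                             | none => ch]) [])

-- ===== PRECONDITION & SPEC =====
-- Pre_ excludes exactly the inputs containing a character that is neither a space nor an
-- ASCII letter: there A's alphabets.index (and B's table lookup) raises ValueError.
def Pre_strman (str : String) : Prop :=
  (str.toList.all (fun ch =>
    ch == ' ' || ('a' ≤ ch && ch ≤ 'z') || ('A' ≤ ch && ch ≤ 'Z'))) = true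
instance (str : String) : Decidable (Pre_strman str) := by unfold Pre_strman; infer_instance

def pvWitness_strman : String := "aZ"

def Spec_strman (str : String) (out : String) : Prop := out = strman_alt str
instance (str : String) (out : String) : Decidable (Spec_strman str out) := by unfold Spec_strman; infer_instance

-- ===== CLAIM (what is proved, stated in full; the proofs are below) =====
def Claim_equal_strman : Prop := ∀ (str : String), Dom_strman str → Pre_strman str → Spec_strman str (strman str)

-- ===== LEMMAS AND PROOFS =====

-- char-level step of A's first loop
def stepA (l : Char) : Char :=
  if l = ' ' then l
  else if (PySem.List.index? strmanAlphabets l).getD 0 = 25 then strmanAlphabets.getD 0 ' '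
  else strmanAlphabets.getD ((PySem.List.index? strmanAlphabets l).getD 0 + 1) ' '

-- char-level step of A's second loop
def stepV (x : Char) : Char :=
  if x ∈ strmanVowels then PySem.Chars.upperChar x else x

-- char-level function of B
def stepB (ch : Char) : Char :=
  if ch = ' ' then ch else
    match strmanTable.get? ch with
    | some v => v
    | none => ch

lemma set_append_len (pre : List Char) (x v : Char) (xs : List Char) :
    (pre ++ x :: xs).set pre.length v = pre ++ v :: xs := by
  induction pre with
  | nil => rfl
  | cons p ps ih => simp [ih]

lemma loop1_eq_map (l : List Char) : ∀ pre : List Char,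
    strmanLoop1 l (pre ++ l) pre.length = pre ++ l.map stepA := by
  induction l with
  | nil => intro pre; simp [strmanLoop1]
  | cons x xs ih =>
    intro pre
    by_cases hx : x = ' '
    · have h := ih (pre ++ [x])
      simp only [List.append_assoc, List.singleton_append, List.length_append,
        List.length_singleton] at h
      simp only [strmanLoop1, hx] at *
      simpa [stepA, hx] using h
    · simp only [strmanLoop1, if_neg hx]
      rw [set_append_len]
      have hst : strmanAlphabets.getD
          (if (PySem.List.index? strmanAlphabets x).getD 0 = 25 then 0
           else (PySem.List.index? strmanAlphabets x).getD 0 + 1) ' ' = stepA x := by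
        unfold stepA; rw [if_neg hx]; split <;> rfl
      rw [hst]
      have h := ih (pre ++ [stepA x])
      simp only [List.append_assoc, List.singleton_append, List.length_append,
        List.length_singleton] at h
      simpa using h

lemma loop2_aux (s : List Char) : ∀ (suf pre : List Char),
    s.drop pre.length = suf →
    (List.range' pre.length suf.length).foldl
      (fun c i => if s.getD i ' ' ∈ strmanVowels
                  then c.set i (PySem.Chars.upperChar (s.getD i ' ')) else c) (pre ++ suf)
      = pre ++ suf.map stepV := by
  intro suf
  induction suf with
  | nil => intro pre _; simp
  | cons x xs ih =>
    intro pre hdrop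
    have hk : pre.length < s.length := by
      by_contra h
      rw [List.drop_eq_nil_of_le (by omega)] at hdrop
      exact List.cons_ne_nil _ _ hdrop.symm
    have hget : s.getD pre.length ' ' = x := by
      have : s.getD pre.length ' ' = (s.drop pre.length).getD 0 ' ' := by
        simp [List.getD, List.getElem?_drop]
      rw [this, hdrop]; rfl
    have hdrop' : s.drop (pre.length + 1) = xs := by
      have h0 := congrArg List.tail hdrop
      simpa [List.tail_drop] using h0
    simp only [List.length_cons, List.range'_succ, List.foldl_cons, hget]
    by_cases hv : x ∈ strmanVowels
    · rw [if_pos hv, set_append_len]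
      have h := ih (pre ++ [PySem.Chars.upperChar x]) (by simpa using hdrop')
      simp only [List.append_assoc, List.singleton_append, List.length_append,
        List.length_singleton] at h
      simpa [stepV, hv] using h
    · rw [if_neg hv]
      have h := ih (pre ++ [x]) (by simpa using hdrop')
      simp only [List.append_assoc, List.singleton_append, List.length_append,
        List.length_singleton] at h
      simpa [stepV, hv] using h

lemma loop2_eq_map (s : List Char) : strmanLoop2 s s = s.map stepV := by
  have h := loop2_aux s s [] (by simp)
  simpa [strmanLoop2, List.range_eq_range'] using h

-- pointwise agreement on the chars that occur after lowering a valid string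
lemma char_agree (x : Char) (hx : x = ' ' ∨ ('a' ≤ x ∧ x ≤ 'z')) :
    stepV (stepA x) = stepB x := by
  rcases hx with h | ⟨h1, h2⟩
  · subst h; decide
  · have hn1 : 97 ≤ x.toNat := h1
    have hn2 : x.toNat ≤ 122 := h2
    have hx : x = Char.ofNat x.toNat := (Char.ofNat_toNat x).symm
    rw [hx]
    interval_cases h : x.toNat <;> decide

-- lowering a valid char lands in ' ' ∪ ['a','z']
lemma lower_valid (ch : Char)
    (h : ch = ' ' ∨ ('a' ≤ ch ∧ ch ≤ 'z') ∨ ('A' ≤ ch ∧ ch ≤ 'Z')) :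
    PySem.Chars.lowerChar ch = ' ' ∨
      ('a' ≤ PySem.Chars.lowerChar ch ∧ PySem.Chars.lowerChar ch ≤ 'z') := by
  rcases h with h | ⟨h1, h2⟩ | ⟨h1, h2⟩
  · subst h; decide
  · have hn1 : 97 ≤ ch.toNat := h1
    have hn2 : ch.toNat ≤ 122 := h2
    have hx : ch = Char.ofNat ch.toNat := (Char.ofNat_toNat ch).symm
    rw [hx]; interval_cases h : ch.toNat <;> decide
  · have hn1 : 65 ≤ ch.toNat := h1
    have hn2 : ch.toNat ≤ 90 := h2
    have hx : ch = Char.ofNat ch.toNat := (Char.ofNat_toNat ch).symm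
    rw [hx]; interval_cases h : ch.toNat <;> decide

-- ===== VERDICT (by name: the statement is the Claim_ definition above) =====
set_option maxHeartbeats 1000000 in
theorem strman_spec : Claim_equal_strman := by
  intro str _ hpre
  unfold Spec_strman
  simp only [strman, strman_alt]
  rw [PySem.List.foldl_append_singleton_eq_map]
  have h1 : strmanLoop1 (PySem.Str.lower str).toList (PySem.Str.lower str).toList 0
      = (PySem.Str.lower str).toList.map stepA := loop1_eq_map _ []
  rw [h1]
  have h2 : strmanLoop2 (String.ofList ((PySem.Str.lower str).toList.map stepA)).toList
        ((PySem.Str.lower str).toList.map stepA)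
      = ((PySem.Str.lower str).toList.map stepA).map stepV := by
    have h3 := loop2_eq_map ((PySem.Str.lower str).toList.map stepA)
    rw [String.toList_ofList]
    exact h3
  rw [h2]
  refine congrArg String.ofList ?_
  have hlist : (PySem.Str.lower str).toList = str.toList.map PySem.Chars.lowerChar := by
    simp [PySem.Str.toList_lower, PySem.Chars.lower]
  rw [hlist]
  simp only [List.map_map, List.nil_append]
  apply List.map_congr_left
  intro ch hch
  have hb := List.all_eq_true.mp hpre ch hch
  simp only [Bool.or_eq_true, Bool.and_eq_true, beq_iff_eq, decide_eq_true_eq] at hb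
  have hb' : ch = ' ' ∨ ('a' ≤ ch ∧ ch ≤ 'z') ∨ ('A' ≤ ch ∧ ch ≤ 'Z') := by
    rcases hb with (h | h) | h
    · exact Or.inl h
    · exact Or.inr (Or.inl h)
    · exact Or.inr (Or.inr h)
  exact char_agree _ (lower_valid ch hb')
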